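-- pv_equiv track=rewrite | github.com/Leviathonlx/MoreBookmarks-Plus | CK3_Color_Storage-main/generate_submod_files.py | get_titles_to_keep
-- ===== SOURCE A (Python) =====
-- def get_titles_to_keep(title_list,exclusion_list):
--     barony_list  = [item for item in title_list if item[0]=='b']
--     county_list  = [item for item in title_list if item[0]=='c']
--     duchy_list   = [item for item in title_list if item[0]=='d']
--     kingdom_list = [item for item in title_list if item[0]=='k']
--     empire_list  = [item for item in title_list if item[0]=='e']
--     #Catch obvious errors
--     duchy_list  = [item for item in duchy_list if item != 'd_emblem']
--     empire_list = [item for item in empire_list if item not in ['e_on_partition','e_names']]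
--     #Build new list without exclusions
--     titles_to_process = []
--     if 'baronies' not in exclusion_list: titles_to_process.extend(barony_list)
--     if 'counties' not in exclusion_list: titles_to_process.extend(county_list)
--     if 'duchies' not in exclusion_list: titles_to_process.extend(duchy_list)
--     if 'kingdoms' not in exclusion_list: titles_to_process.extend(kingdom_list)
--     if 'empires' not in exclusion_list: titles_to_process.extend(empire_list)
--     return titles_to_process
-- ===== SOURCE B (Python) =====
-- def get_titles_to_keep(title_list, exclusion_list):
--     # one pass over title_list, dispatching on the first character into five buckets
--     baronies, counties, duchies, kingdoms, empires = [], [], [], [], []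
--     for item in title_list:
--         p = item[0]
--         if p == 'b':
--             baronies.append(item)
--         elif p == 'c':
--             counties.append(item)
--         elif p == 'd':
--             if item != 'd_emblem':
--                 duchies.append(item)
--         elif p == 'k':
--             kingdoms.append(item)
--         elif p == 'e':
--             if item not in ('e_on_partition', 'e_names'):
--                 empires.append(item)
--     out = []
--     for label, bucket in (('baronies', baronies), ('counties', counties), ('duchies', duchies),
--                           ('kingdoms', kingdoms), ('empires', empires)):
--         if label not in exclusion_list:
--             out += bucket
--     return out
-- ===== Notes on version B (the rewrite author's own statement) =====
-- stated objective: alternative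
-- what changed: Replaces A's five separate scans of title_list plus two post-filter passes with a single pass that dispatches each title on its first character into five buckets (applying the two special exclusions inline), then assembles the result from a fixed label/bucket table.
-- outside the precondition, e.g. on get_titles_to_keep([''], []): A raises IndexError, B raises IndexError
import Mathlib
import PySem

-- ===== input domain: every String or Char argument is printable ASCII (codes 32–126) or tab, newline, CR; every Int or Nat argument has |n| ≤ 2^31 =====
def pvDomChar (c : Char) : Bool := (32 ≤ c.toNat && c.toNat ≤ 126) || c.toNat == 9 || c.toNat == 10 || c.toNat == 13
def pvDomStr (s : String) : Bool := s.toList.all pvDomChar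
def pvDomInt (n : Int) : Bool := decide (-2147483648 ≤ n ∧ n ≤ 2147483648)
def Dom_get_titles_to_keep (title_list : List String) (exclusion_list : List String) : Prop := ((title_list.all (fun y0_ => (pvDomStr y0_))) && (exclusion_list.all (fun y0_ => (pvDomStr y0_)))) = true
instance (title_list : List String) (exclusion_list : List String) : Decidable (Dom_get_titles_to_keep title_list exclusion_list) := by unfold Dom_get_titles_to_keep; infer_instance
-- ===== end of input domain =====

-- B replaces A's five scans of title_list (plus two post-filter passes) with a single
-- dispatch pass into five buckets and a table-driven assembly; one pass instead of seven.


-- ===== PORT A =====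
-- item[0] is ported as PySem.Str.pyGet? item 0 (none = IndexError; Pre_ excludes empty strings)
def get_titles_to_keep (title_list : List String) (exclusion_list : List String) : List String :=
  let barony_list  := title_list.filter (fun item => PySem.Str.pyGet? item 0 == some 'b')
  let county_list  := title_list.filter (fun item => PySem.Str.pyGet? item 0 == some 'c')
  let duchy_list   := title_list.filter (fun item => PySem.Str.pyGet? item 0 == some 'd')
  let kingdom_list := title_list.filter (fun item => PySem.Str.pyGet? item 0 == some 'k')
  let empire_list  := title_list.filter (fun item => PySem.Str.pyGet? item 0 == some 'e')
  let duchy_list   := duchy_list.filter (fun item => item != "d_emblem")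
  let empire_list  := empire_list.filter (fun item => !(["e_on_partition", "e_names"].contains item))
  let titles_to_process : List String := []
  let titles_to_process := if !(exclusion_list.contains "baronies") then titles_to_process ++ barony_list else titles_to_process
  let titles_to_process := if !(exclusion_list.contains "counties") then titles_to_process ++ county_list else titles_to_process
  let titles_to_process := if !(exclusion_list.contains "duchies") then titles_to_process ++ duchy_list else titles_to_process
  let titles_to_process := if !(exclusion_list.contains "kingdoms") then titles_to_process ++ kingdom_list else titles_to_process
  let titles_to_process := if !(exclusion_list.contains "empires") then titles_to_process ++ empire_list else titles_to_process
  titles_to_process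

-- ===== PORT B =====
-- the dispatch step of B's single loop; state = (baronies, counties, duchies, kingdoms, empires)
def pvStepB (acc : List String × List String × List String × List String × List String)
    (item : String) : List String × List String × List String × List String × List String :=
  match PySem.Str.pyGet? item 0 with
  | some p =>
    let (b, c, d, k, e) := acc
    if p == 'b' then (b ++ [item], c, d, k, e)
    else if p == 'c' then (b, c ++ [item], d, k, e)
    else if p == 'd' then (if item != "d_emblem" then (b, c, d ++ [item], k, e) else acc)
    else if p == 'k' then (b, c, d, k ++ [item], e)
    else if p == 'e' then (if !(["e_on_partition", "e_names"].contains item) then (b, c, d, k, e ++ [item]) else acc)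
    else acc
  | none => acc  -- Python raises IndexError here; such inputs are outside Pre_

def get_titles_to_keep_alt (title_list : List String) (exclusion_list : List String) : List String :=
  let bs := title_list.foldl pvStepB ([], [], [], [], [])
  [("baronies", bs.1), ("counties", bs.2.1), ("duchies", bs.2.2.1),
   ("kingdoms", bs.2.2.2.1), ("empires", bs.2.2.2.2)].foldl
    (fun out lb => if !(exclusion_list.contains lb.1) then out ++ lb.2 else out) ([] : List String)

-- ===== PRECONDITION & SPEC =====
-- Pre_ excludes empty strings in title_list: there item[0] raises IndexError in A (and in B).
def Pre_get_titles_to_keep (title_list : List String) (_exclusion_list : List String) : Prop :=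
  ∀ s ∈ title_list, s ≠ ""
instance (title_list : List String) (exclusion_list : List String) : Decidable (Pre_get_titles_to_keep title_list exclusion_list) := by unfold Pre_get_titles_to_keep; infer_instance
def pvWitness_get_titles_to_keep : List String × List String :=
  (["b_x", "c_y", "d_emblem", "d_z", "e_names", "e_q", "k_w", "zzz"], ["counties"])

def Spec_get_titles_to_keep (title_list : List String) (exclusion_list : List String) (out : List String) : Prop := out = get_titles_to_keep_alt title_list exclusion_list
instance (title_list : List String) (exclusion_list : List String) (out : List String) : Decidable (Spec_get_titles_to_keep title_list exclusion_list out) := by unfold Spec_get_titles_to_keep; infer_instance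

-- ===== CLAIM (what is proved, stated in full; the proofs are below) =====
def Claim_equal_get_titles_to_keep : Prop := ∀ (title_list : List String) (exclusion_list : List String), Dom_get_titles_to_keep title_list exclusion_list → Pre_get_titles_to_keep title_list exclusion_list → Spec_get_titles_to_keep title_list exclusion_list (get_titles_to_keep title_list exclusion_list)

-- ===== LEMMAS AND PROOFS =====
-- B's single pass computes exactly A's five (composite) filters, bucket by bucket.
lemma pvFoldB_eq (tl : List String) :
    ∀ b c d k e : List String,
      tl.foldl pvStepB (b, c, d, k, e) =
        (b ++ tl.filter (fun i => PySem.Str.pyGet? i 0 == some 'b'),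
         c ++ tl.filter (fun i => PySem.Str.pyGet? i 0 == some 'c'),
         d ++ tl.filter (fun i => i != "d_emblem" && PySem.Str.pyGet? i 0 == some 'd'),
         k ++ tl.filter (fun i => PySem.Str.pyGet? i 0 == some 'k'),
         e ++ tl.filter (fun i => !(["e_on_partition", "e_names"].contains i) && PySem.Str.pyGet? i 0 == some 'e')) := by
  induction tl with
  | nil => intro b c d k e; simp
  | cons hd tlt ih =>
    intro b c d k e
    simp only [List.foldl_cons, List.filter_cons]
    cases h : PySem.List.pyGet? hd.toList 0 with
    | none => simp [pvStepB, PySem.Str.pyGet?, h, ih]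
    | some p =>
      by_cases hb : p = 'b'
      · simp [pvStepB, PySem.Str.pyGet?, h, hb, ih]
      · by_cases hc : p = 'c'
        · simp [pvStepB, PySem.Str.pyGet?, h, hc, ih]
        · by_cases hd' : p = 'd'
          · by_cases hem : hd = "d_emblem" <;>
              simp [pvStepB, PySem.Str.pyGet?, h, hd', hem, ih]
          · by_cases hk : p = 'k'
            · simp [pvStepB, PySem.Str.pyGet?, h, hk, ih]
            · by_cases he : p = 'e'
              · by_cases h1 : hd = "e_on_partition"
                · simp [pvStepB, PySem.Str.pyGet?, h1, ih]
                · by_cases h2 : hd = "e_names" <;>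
                    simp [pvStepB, PySem.Str.pyGet?, h, he, h1, h2, ih]
              · simp [pvStepB, PySem.Str.pyGet?, h, hb, hc, hd', hk, he, ih]

-- ===== VERDICT (by name: the statement is the Claim_ definition above) =====
theorem get_titles_to_keep_spec : Claim_equal_get_titles_to_keep := by
  intro title_list exclusion_list _ _
  unfold Spec_get_titles_to_keep get_titles_to_keep get_titles_to_keep_alt
  simp only [pvFoldB_eq, List.nil_append, List.foldl_cons, List.foldl_nil,
    List.filter_filter]
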